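-- pv_equiv track=rewrite | github.com/madhur-tandon/Big-Data-Analytics-Assignments | bda.py | eliminate_extra_info
-- ===== SOURCE A (Python) =====
-- def eliminate_extra_info(url_text):
--     url_text = url_text[0]
--     i = -1
--     count = 0
--     while True:
--         i = url_text.find('/', i+1)
--         if i == -1:
--             return url_text[:-1]
--         else:
--             count += 1
--             if count == 3:
--                 return url_text[:i]
-- ===== SOURCE B (Python) =====
-- def eliminate_extra_info(url_text):
--     url_text = url_text[0]
--     parts = url_text.split('/')
--     if len(parts) < 4:
--         return url_text[:-1]
--     return '/'.join(parts[:3])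
-- ===== Notes on version B (the rewrite author's own statement) =====
-- stated objective: idiomatic
-- what changed: Replaces A's repeated str.find loop over slash positions with a single split('/') into segments, a length test, and a '/'.join of the first three parts (keeping A's drop-last-char behaviour when there are fewer than 3 slashes).
import Mathlib
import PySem

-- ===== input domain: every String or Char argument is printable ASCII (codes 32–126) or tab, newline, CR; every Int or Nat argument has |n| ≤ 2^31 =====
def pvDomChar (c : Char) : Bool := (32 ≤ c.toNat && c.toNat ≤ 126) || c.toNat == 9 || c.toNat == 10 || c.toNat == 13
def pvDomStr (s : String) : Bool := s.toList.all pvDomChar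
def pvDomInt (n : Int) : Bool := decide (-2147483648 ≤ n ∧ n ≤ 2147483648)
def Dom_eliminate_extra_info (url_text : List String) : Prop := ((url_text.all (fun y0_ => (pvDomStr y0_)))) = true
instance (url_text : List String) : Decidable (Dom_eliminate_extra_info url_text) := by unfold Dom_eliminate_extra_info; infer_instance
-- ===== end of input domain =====

-- B replaces A's repeated str.find loop with one split('/') + length test + join of the first
-- three parts (objective: idiomatic). Pre_ excludes only the empty list, where A's url_text[0]
-- raises IndexError.

-- ===== PORT A =====
-- A's 'while True' loop: each iteration either returns or increments count, and count == 3
-- returns, so at most 3 iterations run; fuel 3 makes the recursion total (fuel-0 is unreachable).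
def eliminateLoopA (s : String) (i : Int) (count : Nat) (fuel : Nat) : String :=
  match fuel with
  | 0 => ""
  | fuel' + 1 =>
    let i' := PySem.Str.findFrom s "/" (i + 1)
    if i' = -1 then PySem.Str.slice s none (some (-1))
    else if count + 1 = 3 then PySem.Str.slice s none (some i')
    else eliminateLoopA s i' (count + 1) fuel'

def eliminate_extra_info (url_text : List String) : String :=
  match PySem.List.pyGet? url_text 0 with
  | none => ""   -- IndexError in Python; excluded by Pre_
  | some s => eliminateLoopA s (-1) 0 3

-- ===== PORT B =====
def eliminate_extra_info_alt (url_text : List String) : String :=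
  match PySem.List.pyGet? url_text 0 with
  | none => ""   -- IndexError in Python; excluded by Pre_
  | some s =>
    let parts := PySem.Chars.splitOn s.toList ['/']
    if parts.length < 4 then PySem.Str.slice s none (some (-1))
    else String.ofList (PySem.Chars.join ['/'] (PySem.List.slice parts none (some 3)))

-- ===== PRECONDITION & SPEC =====
-- Pre_ excludes only the empty list, on which A's 'url_text[0]' raises IndexError.
def Pre_eliminate_extra_info (url_text : List String) : Prop := url_text ≠ []
instance (url_text : List String) : Decidable (Pre_eliminate_extra_info url_text) := by
  unfold Pre_eliminate_extra_info; infer_instance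

def pvWitness_eliminate_extra_info : List String := ["http://a.com/b/c"]

def Spec_eliminate_extra_info (url_text : List String) (out : String) : Prop :=
  out = eliminate_extra_info_alt url_text
instance (url_text : List String) (out : String) : Decidable (Spec_eliminate_extra_info url_text out) := by
  unfold Spec_eliminate_extra_info; infer_instance

-- ===== CLAIM (what is proved, stated in full; the proofs are below) =====
def Claim_equal_eliminate_extra_info : Prop :=
  ∀ (url_text : List String), Dom_eliminate_extra_info url_text →
    Pre_eliminate_extra_info url_text →
    Spec_eliminate_extra_info url_text (eliminate_extra_info url_text)

-- ===== LEMMAS AND PROOFS =====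

-- index of the first '/' in a char list, if any
def findSlash : List Char → Option Nat
  | [] => none
  | c :: t => if c = '/' then some 0 else (findSlash t).map (· + 1)

-- simple structural splitter on '/'
def split1 : List Char → List (List Char)
  | [] => [[]]
  | c :: t =>
    if c = '/' then [] :: split1 t
    else
      match split1 t with
      | [] => [[c]]
      | p :: ps => (c :: p) :: ps

theorem split1_ne_nil (cs : List Char) : split1 cs ≠ [] := by
  cases cs with
  | nil => simp [split1]
  | cons c t =>
    simp only [split1]
    split
    · simp
    · cases h : split1 t <;> simp

theorem findgo_eq (t : List Char) : ∀ k : Nat,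
    PySem.Chars.find.go ['/'] t k =
      match findSlash t with
      | none => -1
      | some j => ((k + j : Nat) : Int) := by
  induction t with
  | nil => intro k; simp [PySem.Chars.find.go, findSlash]
  | cons c t ih =>
    intro k
    rw [PySem.Chars.find.go]
    by_cases hc : c = '/'
    · subst hc
      simp [findSlash, List.isPrefixOf]
    · have hpre : List.isPrefixOf ['/'] (c :: t) = false := by
        simp [List.isPrefixOf]
        exact fun h => absurd h.symm hc
      simp only [hpre, Bool.false_eq_true, if_false, ih (k + 1), findSlash, hc, if_false]
      cases h : findSlash t with
      | none => simp
      | some j => simp only [Option.map_some]; push_cast; ring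

theorem find_eq_findSlash (cs : List Char) :
    PySem.Chars.find cs ['/'] =
      match findSlash cs with
      | none => -1
      | some j => (j : Int) := by
  unfold PySem.Chars.find
  rw [findgo_eq cs 0]
  cases h : findSlash cs <;> simp

theorem findSlash_none (cs : List Char) (h : findSlash cs = none) : split1 cs = [cs] := by
  induction cs with
  | nil => simp [split1]
  | cons c t ih =>
    simp only [findSlash] at h
    by_cases hc : c = '/'
    · simp [hc] at h
    · simp [hc] at h
      simp [split1, hc, ih h]

theorem findSlash_some (cs : List Char) : ∀ j : Nat, findSlash cs = some j →
    j < cs.length ∧ cs = cs.take j ++ '/' :: cs.drop (j + 1) ∧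
      split1 cs = cs.take j :: split1 (cs.drop (j + 1)) := by
  induction cs with
  | nil => intro j h; simp [findSlash] at h
  | cons c t ih =>
    intro j h
    simp only [findSlash] at h
    by_cases hc : c = '/'
    · simp [hc] at h
      subst h
      refine ⟨by simp, by simp [hc], ?_⟩
      simp [split1, hc]
    · simp [hc] at h
      obtain ⟨j', hj', rfl⟩ := h
      obtain ⟨h1, h2, h3⟩ := ih j' hj'
      refine ⟨by simpa using h1, ?_, ?_⟩
      · simpa using congrArg (c :: ·) h2
      · simp only [split1, hc, if_false, h3, List.take_succ_cons, List.drop_succ_cons]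

-- splitOn on a single-char separator computes split1
theorem splitOn_go_spec : ∀ (fuel : Nat) (l cur : List Char) (acc : List (List Char)),
    l.length < fuel →
    PySem.Chars.splitOn.go ['/'] fuel l cur acc =
      acc.reverse ++
        (match split1 l with
         | [] => []
         | p :: ps => (cur.reverse ++ p) :: ps) := by
  intro fuel
  induction fuel with
  | zero => intro l cur acc h; omega
  | succ fuel ih =>
    intro l cur acc h
    cases l with
    | nil =>
      rw [PySem.Chars.splitOn.go]
      · simp [split1]
      · omega
    | cons c t =>
      rw [PySem.Chars.splitOn.go]
      by_cases hc : c = '/'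
      · subst hc
        have hpre : List.isPrefixOf ['/'] ('/' :: t) = true := by simp [List.isPrefixOf]
        simp only [hpre, if_true]
        have hd : List.drop (['/'].length) ('/' :: t) = t := rfl
        rw [hd, ih t [] ((cur.reverse) :: acc) (by simpa using Nat.lt_of_succ_lt_succ h)]
        simp only [split1, if_true]
        cases hs : split1 t with
        | nil => exact absurd hs (split1_ne_nil t)
        | cons p ps => simp
      · have hpre : List.isPrefixOf ['/'] (c :: t) = false := by
          simp [List.isPrefixOf]
          exact fun hh => absurd hh.symm hc
        simp only [hpre, Bool.false_eq_true, if_false]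
        rw [ih t (c :: cur) acc (by simpa using Nat.lt_of_succ_lt_succ h)]
        simp only [split1, hc, if_false]
        cases hs : split1 t with
        | nil => exact absurd hs (split1_ne_nil t)
        | cons p ps => simp

theorem splitOn_eq_split1 (cs : List Char) :
    PySem.Chars.splitOn cs ['/'] = split1 cs := by
  unfold PySem.Chars.splitOn
  rw [splitOn_go_spec (cs.length + 1) cs [] [] (by omega)]
  cases hs : split1 cs with
  | nil => exact absurd hs (split1_ne_nil cs)
  | cons p ps => simp

theorem findFrom_succ (cs : List Char) (k : Nat) (hk : k ≤ cs.length) :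
    PySem.Chars.findFrom cs ['/'] (k : Int) none =
      match findSlash (cs.drop k) with
      | none => -1
      | some j => ((k + j : Nat) : Int) := by
  rw [PySem.Chars.findFrom_natCast cs ['/'] k hk]
  rw [find_eq_findSlash]
  cases h : findSlash (cs.drop k) with
  | none => simp
  | some j => push_cast; ring

theorem main_eq (s : String) :
    eliminateLoopA s (-1) 0 3 =
      (let parts := PySem.Chars.splitOn s.toList ['/']
       if parts.length < 4 then PySem.Str.slice s none (some (-1))
       else String.ofList (PySem.Chars.join ['/'] (PySem.List.slice parts none (some 3)))) := by
  have hfz : PySem.Str.findFrom s "/" 0 =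
      match findSlash s.toList with
      | none => -1
      | some j => (j : Int) := by
    show PySem.Chars.findFrom s.toList "/".toList 0 none = _
    have : "/".toList = ['/'] := rfl
    rw [this, PySem.Chars.findFrom_zero, find_eq_findSlash]
  simp only [splitOn_eq_split1]
  set cs := s.toList with hcs
  -- unfold the three iterations of A's loop
  rw [eliminateLoopA]
  simp only [neg_add_cancel]
  rw [hfz]
  cases h1 : findSlash cs with
  | none =>
    -- no slash: split1 cs = [cs], length 1 < 4, both sides are s[:-1]
    simp only [findSlash_none cs h1]
    norm_num
  | some j1 =>
    obtain ⟨hl1, he1, hs1⟩ := findSlash_some cs j1 h1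
    simp only [show ((j1 : Int) = -1) = False by simp, if_false, if_neg (by omega : ¬ (0+1 = 3))]
    rw [eliminateLoopA]
    have hff2 : PySem.Str.findFrom s "/" ((j1 : Int) + 1) =
        match findSlash (cs.drop (j1 + 1)) with
        | none => -1
        | some j => (((j1 + 1 + j : Nat) : Int)) := by
      show PySem.Chars.findFrom s.toList "/".toList ((j1 : Int) + 1) none = _
      have h11 : ((j1 : Int) + 1) = ((j1 + 1 : Nat) : Int) := by push_cast; ring
      rw [show "/".toList = ['/'] from rfl, h11, findFrom_succ s.toList (j1 + 1) (by rw [← hcs]; omega)]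
    rw [hff2]
    cases h2 : findSlash (cs.drop (j1 + 1)) with
    | none =>
      -- one slash: split1 has length 2
      simp only [hs1, findSlash_none _ h2]
      norm_num
    | some j2 =>
      obtain ⟨hl2, he2, hs2⟩ := findSlash_some _ j2 h2
      rw [if_neg (show ¬ (((j1 + 1 + j2 : Nat) : Int) = -1) by omega),
        if_neg (by omega : ¬ (0+1+1 = 3))]
      rw [eliminateLoopA]
      have hff3 : PySem.Str.findFrom s "/" (((j1 + 1 + j2 : Nat) : Int) + 1) =
          match findSlash (cs.drop (j1 + 1 + j2 + 1)) with
          | none => -1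
          | some j => (((j1 + 1 + j2 + 1 + j : Nat) : Int)) := by
        show PySem.Chars.findFrom s.toList "/".toList _ none = _
        have h11 : (((j1 + 1 + j2 : Nat) : Int) + 1) = ((j1 + 1 + j2 + 1 : Nat) : Int) := by
          push_cast; ring
        have hlen2 : j1 + 1 + j2 + 1 ≤ cs.length := by
          have := hl2
          simp only [List.length_drop] at this
          omega
        rw [show "/".toList = ['/'] from rfl, h11, findFrom_succ s.toList (j1 + 1 + j2 + 1) hlen2]
      have hd21 : (cs.drop (j1 + 1)).drop (j2 + 1) = cs.drop (j1 + 1 + j2 + 1) := by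
        rw [List.drop_drop]; ring_nf
      rw [hff3]
      cases h3 : findSlash (cs.drop (j1 + 1 + j2 + 1)) with
      | none =>
        -- two slashes: split1 has length 3
        rw [← hd21] at h3
        simp only [hs1, hs2, findSlash_none _ h3]
        norm_num
      | some j3 =>
        obtain ⟨hl3, he3, hs3⟩ := findSlash_some _ j3 h3
        rw [← hd21] at hs3
        rw [if_neg (show ¬ (((j1 + 1 + j2 + 1 + j3 : Nat) : Int) = -1) by omega),
          if_pos (rfl : 0+1+1+1 = 3)]
        -- ≥ three slashes: A returns s[:a3], B joins the first three parts
        have hlen4 : ¬ (split1 cs).length < 4 := by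
          have := split1_ne_nil ((cs.drop (j1+1)).drop (j2+1))
          simp only [hs1, hs2, hs3]
          cases h : split1 (((cs.drop (j1+1)).drop (j2+1)).drop (j3+1)) with
          | nil => exact absurd h (split1_ne_nil _)
          | cons p ps => simp
        simp only [hlen4, if_false]
        -- both sides as String.ofList of char lists
        show PySem.Str.slice s none (some ((j1 + 1 + j2 + 1 + j3 : Nat) : Int)) = _
        unfold PySem.Str.slice
        congr 1
        rw [PySem.Chars.slice_eq_listSlice, PySem.List.slice_to_natCast]
        -- compute the B-side list
        have h3n : (some (3 : Int)) = some (((3 : Nat) : Int)) := by norm_num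
        rw [hs1, hs2, hs3, h3n, PySem.List.slice_to_natCast]
        cases hps : split1 ((((cs.drop (j1+1)).drop (j2+1))).drop (j3+1)) with
        | nil => exact absurd hps (split1_ne_nil _)
        | cons p ps =>
          simp only [List.take_succ_cons, List.take_zero]
          have hjoin : PySem.Chars.join ['/']
              [cs.take j1, (cs.drop (j1+1)).take j2, ((cs.drop (j1+1)).drop (j2+1)).take j3] =
              cs.take j1 ++ '/' :: ((cs.drop (j1+1)).take j2 ++ '/' ::
                ((cs.drop (j1+1)).drop (j2+1)).take j3) := by
            unfold PySem.Chars.join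
            simp [List.intercalate]
          rw [hjoin]
          -- cs decomposes as that join followed by '/' :: rest
          have hdec : cs = (cs.take j1 ++ '/' :: ((cs.drop (j1+1)).take j2 ++ '/' ::
              ((cs.drop (j1+1)).drop (j2+1)).take j3)) ++
              '/' :: (((cs.drop (j1+1)).drop (j2+1)).drop (j3+1)) := by
            rw [← hd21] at he3
            calc cs = cs.take j1 ++ '/' :: cs.drop (j1+1) := he1
              _ = cs.take j1 ++ '/' :: ((cs.drop (j1+1)).take j2 ++ '/' ::
                    (cs.drop (j1+1)).drop (j2+1)) := by conv_lhs => rw [he2]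
              _ = cs.take j1 ++ '/' :: ((cs.drop (j1+1)).take j2 ++ '/' ::
                    (((cs.drop (j1+1)).drop (j2+1)).take j3 ++ '/' ::
                      ((cs.drop (j1+1)).drop (j2+1)).drop (j3+1))) := by
                    conv_lhs => rw [he3]
              _ = (cs.take j1 ++ '/' :: ((cs.drop (j1+1)).take j2 ++ '/' ::
                    ((cs.drop (j1+1)).drop (j2+1)).take j3)) ++
                    '/' :: (((cs.drop (j1+1)).drop (j2+1)).drop (j3+1)) := by
                    simp [List.append_assoc]
          have hlent : (cs.take j1 ++ '/' :: ((cs.drop (j1+1)).take j2 ++ '/' ::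
              ((cs.drop (j1+1)).drop (j2+1)).take j3)).length = j1 + 1 + j2 + 1 + j3 := by
            simp only [List.length_append, List.length_cons, List.length_take]
            have e1 : j1 ≤ cs.length := by omega
            have e2 : j2 ≤ (cs.drop (j1+1)).length := by omega
            have e3 : j3 ≤ ((cs.drop (j1+1)).drop (j2+1)).length := by rw [hd21]; omega
            omega
          rw [← hcs]
          conv_lhs => rw [hdec]
          rw [← hlent, List.take_left]

-- ===== VERDICT (by name: the statement is the Claim_ definition above) =====
theorem eliminate_extra_info_spec : Claim_equal_eliminate_extra_info := by
  intro url_text _ hpre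
  unfold Spec_eliminate_extra_info eliminate_extra_info eliminate_extra_info_alt
  cases url_text with
  | nil => exact absurd rfl hpre
  | cons s rest =>
    have : PySem.List.pyGet? (s :: rest) (0 : Int) = some s := by
      simp [PySem.List.pyGet?, PySem.List.pyIdx?]
    rw [this]
    exact main_eq s
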